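-- pv_equiv track=rewrite | github.com/lpk04/IR | src/build_candidate_pool.py | top_k_unique_from_run
-- ===== SOURCE A (Python) =====
-- from typing import Any
--
-- def resolve_doc_id(docid: str, line_to_doc_id: dict[str, str], doc_meta: dict[str, dict[str, Any]]) -> str:
--     """
--     Resolve docid from run files to corpus doc_id.
--
--     Handles:
--     - direct doc_id matches
--     - line-number based ids
--     """
--     if docid in doc_meta:
--         return docid
--
--     if docid in line_to_doc_id:
--         return line_to_doc_id[docid]
--
--     stripped = str(docid).strip()
--     if stripped in doc_meta:
--         return stripped
--
--     if stripped in line_to_doc_id: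
--         return line_to_doc_id[stripped]
--
--     return stripped
--
-- def top_k_unique_from_run(
--     run_map: dict[str, dict[str, int]],
--     qid: str,
--     top_k: int,
--     line_to_doc_id: dict[str, str],
--     doc_meta: dict[str, dict[str, Any]],
-- ) -> list[tuple[str, int]]:
--     """
--     Return top_k unique docs for a given qid, sorted by rank ascending.
--     """
--     doc_ranks = run_map.get(qid, {})
--     items = []
--
--     for docid, rank in doc_ranks.items():
--         resolved = resolve_doc_id(docid, line_to_doc_id, doc_meta)
--         items.append((resolved, rank))
--
--     items.sort(key=lambda x: (x[1], x[0]))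
--
--     seen = set()
--     top_docs: list[tuple[str, int]] = []
--     for doc_id, rank in items:
--         if doc_id in seen:
--             continue
--         seen.add(doc_id)
--         top_docs.append((doc_id, rank))
--         if len(top_docs) >= top_k:
--             break
--
--     return top_docs
-- ===== SOURCE B (Python) =====
-- from typing import Any
--
-- def _resolve(docid: str, line_to_doc_id: dict[str, str], doc_meta: dict[str, dict[str, Any]]) -> str:
--     # Try the raw id, then the stripped id, against doc_meta then line_to_doc_id.
--     for cand in (docid, docid.strip()):
--         if cand in doc_meta:
--             return cand
--         if cand in line_to_doc_id:
--             return line_to_doc_id[cand]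
--     return docid.strip()
--
-- def top_k_unique_from_run(
--     run_map: dict[str, dict[str, int]],
--     qid: str,
--     top_k: int,
--     line_to_doc_id: dict[str, str],
--     doc_meta: dict[str, dict[str, Any]],
-- ) -> list[tuple[str, int]]:
--     # Collapse to each resolved doc's best (minimum) rank first, then sort once:
--     # no seen-set dedup pass is needed afterwards.
--     best: dict[str, int] = {}
--     for docid, rank in run_map.get(qid, {}).items():
--         doc = _resolve(docid, line_to_doc_id, doc_meta)
--         if doc not in best or rank < best[doc]:
--             best[doc] = rank
--
--     out: list[tuple[str, int]] = []
--     for rank, doc in sorted((r, d) for d, r in best.items()):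
--         out.append((doc, rank))
--         if len(out) >= top_k:
--             break
--     return out
-- ===== Notes on version B (the rewrite author's own statement) =====
-- stated objective: alternative
-- what changed: B drops A's sort-then-dedup-with-a-seen-set: it first collapses the query's run entries into a dict mapping each resolved doc to its minimum rank (conditional update), then sorts the already-unique (rank, doc) pairs plainly (no key function) and truncates with the same append-then-break loop; the id resolver is a candidate loop over (raw, stripped) instead of an if-chain.
import Mathlib
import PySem

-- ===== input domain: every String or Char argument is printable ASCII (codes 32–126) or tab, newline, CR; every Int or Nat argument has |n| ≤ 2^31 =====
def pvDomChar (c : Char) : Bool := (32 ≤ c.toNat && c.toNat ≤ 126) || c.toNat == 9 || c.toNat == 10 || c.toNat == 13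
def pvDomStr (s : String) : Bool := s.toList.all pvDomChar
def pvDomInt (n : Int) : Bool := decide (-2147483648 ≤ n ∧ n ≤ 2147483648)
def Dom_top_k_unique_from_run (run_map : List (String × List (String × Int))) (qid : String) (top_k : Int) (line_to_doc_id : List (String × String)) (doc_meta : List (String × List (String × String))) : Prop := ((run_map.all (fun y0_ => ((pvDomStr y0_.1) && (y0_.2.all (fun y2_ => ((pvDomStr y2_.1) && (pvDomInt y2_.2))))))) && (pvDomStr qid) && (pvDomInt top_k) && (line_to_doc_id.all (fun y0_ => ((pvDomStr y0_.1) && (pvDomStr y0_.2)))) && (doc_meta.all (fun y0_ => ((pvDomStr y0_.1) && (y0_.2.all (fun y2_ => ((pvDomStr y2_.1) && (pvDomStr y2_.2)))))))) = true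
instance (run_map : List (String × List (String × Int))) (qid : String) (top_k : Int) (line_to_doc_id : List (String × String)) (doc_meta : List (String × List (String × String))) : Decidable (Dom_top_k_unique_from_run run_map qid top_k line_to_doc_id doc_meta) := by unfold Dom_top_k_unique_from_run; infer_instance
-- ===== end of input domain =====

-- B collapses the run entries into a dict of each resolved doc's minimum rank (conditional update)
-- and sorts those already-unique (rank, doc) pairs plainly, instead of A's sort-then-dedup-with-a-
-- seen-set; the resolver is a candidate loop instead of an if-chain (alternative structure, same
-- cost); the append-then-break truncation is kept, so A = B on every input.

-- ===== PORT A =====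
-- module helper resolve_doc_id as Source A writes it: a four-way if-chain
def resolveDocId (docid : String) (line_to_doc_id : List (String × String)) (doc_meta : List (String × List (String × String))) : String :=
  if (PySem.Dict.mk doc_meta).contains docid then docid
  else if (PySem.Dict.mk line_to_doc_id).contains docid then
    (PySem.Dict.mk line_to_doc_id).getD docid docid
  else
    let stripped := PySem.Str.strip docid
    if (PySem.Dict.mk doc_meta).contains stripped then stripped
    else if (PySem.Dict.mk line_to_doc_id).contains stripped then
      (PySem.Dict.mk line_to_doc_id).getD stripped stripped
    else stripped

-- A's final loop: skip seen ids, append, break once len(top_docs) >= top_k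
def takeLoopA (top_k : Int) : List (String × Int) → List String → List (String × Int) → List (String × Int)
  | [], _, top_docs => top_docs
  | (doc_id, rank) :: rest, seen, top_docs =>
    if doc_id ∈ seen then takeLoopA top_k rest seen top_docs
    else
      let top_docs' := top_docs ++ [(doc_id, rank)]
      if (top_docs'.length : Int) ≥ top_k then top_docs'
      else takeLoopA top_k rest (PySem.Set.add seen doc_id) top_docs'

def top_k_unique_from_run (run_map : List (String × List (String × Int))) (qid : String) (top_k : Int) (line_to_doc_id : List (String × String)) (doc_meta : List (String × List (String × String))) : List (String × Int) :=
  let doc_ranks := ((PySem.Dict.mk run_map).get? qid).getD []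
  let items := doc_ranks.foldl (fun acc p => acc ++ [(resolveDocId p.1 line_to_doc_id doc_meta, p.2)]) []
  let itemsSorted := PySem.List.sorted2 items (fun x => x.2) (fun x => x.1)
  takeLoopA top_k itemsSorted [] []

-- ===== PORT B =====
-- Source B's _resolve: scan the candidate list (docid, docid.strip()); none = fell off the loop
def resolveScan (line_to_doc_id : List (String × String)) (doc_meta : List (String × List (String × String))) : List String → Option String
  | [] => none
  | cand :: rest =>
    if (PySem.Dict.mk doc_meta).contains cand then some cand
    else
      match (PySem.Dict.mk line_to_doc_id).get? cand with
      | some v => some v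
      | none => resolveScan line_to_doc_id doc_meta rest

def resolveAlt (docid : String) (line_to_doc_id : List (String × String)) (doc_meta : List (String × List (String × String))) : String :=
  (resolveScan line_to_doc_id doc_meta [docid, PySem.Str.strip docid]).getD (PySem.Str.strip docid)

-- Source B's second loop: append (doc, rank), break once len(out) >= top_k (input pairs are (rank, doc))
def takeLoopB (top_k : Int) : List (Int × String) → List (String × Int) → List (String × Int)
  | [], out => out
  | (rank, doc) :: rest, out =>
    let out' := out ++ [(doc, rank)]
    if (out'.length : Int) < top_k then takeLoopB top_k rest out' else out'

def top_k_unique_from_run_alt (run_map : List (String × List (String × Int))) (qid : String) (top_k : Int) (line_to_doc_id : List (String × String)) (doc_meta : List (String × List (String × String))) : List (String × Int) :=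
  let best := (((PySem.Dict.mk run_map).get? qid).getD []).foldl
    (fun (best : PySem.Dict String Int) p =>
      let doc := resolveAlt p.1 line_to_doc_id doc_meta
      if ¬ best.contains doc ∨ p.2 < best.getD doc p.2 then best.insert doc p.2 else best)
    PySem.Dict.empty
  -- sorted((r, d) …) compares Python tuples lexicographically: key = toLex
  let ordered := PySem.List.sorted (best.items.map (fun p => (p.2, p.1))) (fun x => toLex x)
  takeLoopB top_k ordered []

-- ===== PRECONDITION & SPEC =====
def Spec_top_k_unique_from_run (run_map : List (String × List (String × Int))) (qid : String) (top_k : Int) (line_to_doc_id : List (String × String)) (doc_meta : List (String × List (String × String))) (out : List (String × Int)) : Prop := out = top_k_unique_from_run_alt run_map qid top_k line_to_doc_id doc_meta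
instance (run_map : List (String × List (String × Int))) (qid : String) (top_k : Int) (line_to_doc_id : List (String × String)) (doc_meta : List (String × List (String × String))) (out : List (String × Int)) : Decidable (Spec_top_k_unique_from_run run_map qid top_k line_to_doc_id doc_meta out) := by unfold Spec_top_k_unique_from_run; infer_instance

-- ===== CLAIM (what is proved, stated in full; the proofs are below) =====
def Claim_equal_top_k_unique_from_run : Prop := ∀ (run_map : List (String × List (String × Int))) (qid : String) (top_k : Int) (line_to_doc_id : List (String × String)) (doc_meta : List (String × List (String × String))), Dom_top_k_unique_from_run run_map qid top_k line_to_doc_id doc_meta → Spec_top_k_unique_from_run run_map qid top_k line_to_doc_id doc_meta (top_k_unique_from_run run_map qid top_k line_to_doc_id doc_meta)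

-- ===== LEMMAS AND PROOFS =====

-- the Python sort key (rank, doc_id), as a lexicographic value
def keyRI (x : String × Int) : Lex (Int × String) := toLex (x.2, x.1)

-- B's dict-building step, isolated
def bestStep (d : PySem.Dict String Int) (p : String × Int) : PySem.Dict String Int :=
  if ¬ d.contains p.1 ∨ p.2 < d.getD p.1 p.2 then d.insert p.1 p.2 else d

-- A's dedup-by-seen pass, isolated from the truncation
def dedupF : List (String × Int) → List String → List (String × Int)
  | [], _ => []
  | (d, r) :: rest, seen =>
    if d ∈ seen then dedupF rest seen
    else (d, r) :: dedupF rest (PySem.Set.add seen d)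

-- ranks attached to one doc id
def ranksOf (d : String) (l : List (String × Int)) : List Int :=
  (l.filter (fun p => p.1 == d)).map (·.2)

-- option-valued min combine
def ocomb : Option Int → Option Int → Option Int
  | none, o => o
  | some v, none => some v
  | some v, some m => some (min v m)

lemma ocomb_assoc (a b c : Option Int) : ocomb (ocomb a b) c = ocomb a (ocomb b c) := by
  cases a <;> cases b <;> cases c <;> simp [ocomb, min_assoc]

lemma resolveAlt_eq (docid : String) (line_to_doc_id : List (String × String)) (doc_meta : List (String × List (String × String))) :
    resolveAlt docid line_to_doc_id doc_meta = resolveDocId docid line_to_doc_id doc_meta := by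
  unfold resolveAlt resolveScan resolveDocId
  cases h1 : (PySem.Dict.mk doc_meta).contains docid
  · cases h2 : (PySem.Dict.mk line_to_doc_id).get? docid with
    | none =>
      have h2' : (PySem.Dict.mk line_to_doc_id).contains docid = false := by
        rw [PySem.Dict.contains_eq_isSome_get?, h2]; rfl
      cases h3 : (PySem.Dict.mk doc_meta).contains (PySem.Str.strip docid)
      · cases h4 : (PySem.Dict.mk line_to_doc_id).get? (PySem.Str.strip docid) with
        | none =>
          have h4' : (PySem.Dict.mk line_to_doc_id).contains (PySem.Str.strip docid) = false := by
            rw [PySem.Dict.contains_eq_isSome_get?, h4]; rfl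
          simp [resolveScan, h2', h3, h4, h4']
        | some v =>
          have h4' : (PySem.Dict.mk line_to_doc_id).contains (PySem.Str.strip docid) = true := by
            rw [PySem.Dict.contains_eq_isSome_get?, h4]; rfl
          simp [resolveScan, h2', h3, h4, h4', PySem.Dict.getD_eq_get?_getD]
      · simp [resolveScan, h2', h3]
    | some v =>
      have h2' : (PySem.Dict.mk line_to_doc_id).contains docid = true := by
        rw [PySem.Dict.contains_eq_isSome_get?, h2]; rfl
      simp [h2, h2', PySem.Dict.getD_eq_get?_getD]
  · simp

lemma takeLoopA_eq_takeLoopB (k : Int) (l : List (String × Int)) (seen : List String) (acc : List (String × Int)) :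
    takeLoopA k l seen acc = takeLoopB k ((dedupF l seen).map (fun p => (p.2, p.1))) acc := by
  induction l generalizing seen acc with
  | nil => simp [takeLoopA, takeLoopB, dedupF]
  | cons p rest ih =>
    obtain ⟨d, r⟩ := p
    by_cases hm : d ∈ seen
    · simp [takeLoopA, dedupF, hm, ih]
    · simp only [takeLoopA, dedupF, hm, if_false, List.map_cons, takeLoopB]
      have : ((acc ++ [(d, r)]).length : Int) ≥ k ↔ ¬ ((acc ++ [(d, r)]).length : Int) < k := by omega
      split
      · rw [if_neg (by omega)]
      · rw [if_pos (by omega)]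
        exact ih _ _

lemma dedupF_sublist (l : List (String × Int)) (seen : List String) : (dedupF l seen).Sublist l := by
  induction l generalizing seen with
  | nil => simp [dedupF]
  | cons p rest ih =>
    obtain ⟨d, r⟩ := p
    by_cases hm : d ∈ seen
    · simp only [dedupF, hm, if_true]
      exact (ih seen).trans (List.sublist_cons_self _ _)
    · simpa only [dedupF, hm, if_false, List.cons_sublist_cons] using ih _

lemma dedupF_fst_nodup (l : List (String × Int)) (seen : List String) :
    ((dedupF l seen).map (·.1)).Nodup ∧ ∀ d ∈ (dedupF l seen).map (·.1), d ∉ seen := by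
  induction l generalizing seen with
  | nil => simp [dedupF]
  | cons p rest ih =>
    obtain ⟨d, r⟩ := p
    by_cases hm : d ∈ seen
    · simpa only [dedupF, hm, if_true] using ih seen
    · have ihr := ih (PySem.Set.add seen d)
      simp only [dedupF, hm, if_false, List.map_cons, List.nodup_cons, List.mem_cons]
      refine ⟨⟨fun hd => ?_, ihr.1⟩, fun x hx => ?_⟩
      · exact absurd ((PySem.Set.mem_add seen d d).mpr (Or.inr rfl)) (by simpa using ihr.2 d hd)
      · rcases hx with hx | hx
        · exact hx ▸ hm
        · intro hxs
          exact ihr.2 x hx ((PySem.Set.mem_add seen d x).mpr (Or.inl hxs))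

lemma mem_dedupF (l : List (String × Int)) (seen : List String)
    (hs : l.Pairwise (fun a b => keyRI a ≤ keyRI b)) (d : String) (r : Int) :
    ((d, r) ∈ dedupF l seen ↔ (d ∉ seen ∧ (ranksOf d l).min? = some r)) := by
  induction l generalizing seen with
  | nil => simp [dedupF, ranksOf]
  | cons p rest ih =>
    obtain ⟨a, b⟩ := p
    have hhead : ∀ q ∈ rest, keyRI (a, b) ≤ keyRI q := (List.pairwise_cons.mp hs).1
    have htail : rest.Pairwise (fun x y => keyRI x ≤ keyRI y) := (List.pairwise_cons.mp hs).2
    by_cases hm : a ∈ seen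
    · have hne : a ≠ d ∨ d ∈ seen := by
        by_cases h : a = d
        · exact Or.inr (h ▸ hm)
        · exact Or.inl h
      simp only [dedupF, hm, if_true, ih _ htail]
      rcases hne with h | h
      · simp [ranksOf, beq_iff_eq, h]
      · simp [h]
    · simp only [dedupF, hm, if_false, List.mem_cons]
      by_cases had : a = d
      · subst had
        have hmin : (ranksOf a ((a, b) :: rest)).min? = some b := by
          rw [List.min?_eq_some_iff]
          constructor
          · simp [ranksOf]
          · intro x hx
            simp only [ranksOf, List.map_cons, List.filter_cons, beq_self_eq_true, if_true,
              List.mem_cons, List.mem_map, List.mem_filter, beq_iff_eq] at hx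
            rcases hx with hx | ⟨q, ⟨hq, hq1⟩, hq2⟩
            · omega
            · have := hhead q hq
              simp only [keyRI, Prod.Lex.le_iff, ofLex_toLex] at this
              rcases this with h | ⟨h, _⟩ <;> omega
        rw [hmin]
        constructor
        · rintro (h | h)
          · injection h with h1 h2
            exact ⟨hm, by rw [h2]⟩
          · have := ((ih _ htail).mp h).1
            exact absurd ((PySem.Set.mem_add seen a a).mpr (Or.inr rfl)) this
        · rintro ⟨hds, hr⟩
          injection hr with h
          exact Or.inl (by rw [h])
      · have hrk : ranksOf d ((a, b) :: rest) = ranksOf d rest := by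
          simp [ranksOf, had]
        rw [hrk]
        constructor
        · rintro (h | h)
          · exact absurd (congrArg Prod.fst h).symm had
          · obtain ⟨hnot, hmin⟩ := (ih _ htail).mp h
            refine ⟨fun hh => hnot ((PySem.Set.mem_add seen a d).mpr (Or.inl hh)), hmin⟩
        · rintro ⟨hds, hmin⟩
          refine Or.inr ((ih _ htail).mpr ⟨?_, hmin⟩)
          intro hmem
          rcases (PySem.Set.mem_add seen a d).mp hmem with h | h
          · exact hds h
          · exact had h.symm

lemma get?_foldl_best (l : List (String × Int)) (d0 : PySem.Dict String Int) (k : String) :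
    (l.foldl bestStep d0).get? k = ocomb (d0.get? k) ((ranksOf k l).min?) := by
  induction l generalizing d0 with
  | nil => cases h : d0.get? k <;> simp [ranksOf, ocomb, h]
  | cons p rest ih =>
    obtain ⟨a, b⟩ := p
    rw [List.foldl_cons, ih]
    have hstep : (bestStep d0 (a, b)).get? k = ocomb (d0.get? k) (if a = k then some b else none) := by
      unfold bestStep
      by_cases h : a = k
      · subst h
        cases hg : d0.get? a with
        | none =>
          have hc : d0.contains a = false := by rw [PySem.Dict.contains_eq_isSome_get?, hg]; rfl
          simp [hc, PySem.Dict.get?_insert_self, ocomb]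
        | some v =>
          have hc : d0.contains a = true := by rw [PySem.Dict.contains_eq_isSome_get?, hg]; rfl
          rw [PySem.Dict.getD_of_get?_eq_some d0 b hg]
          by_cases hlt : b < v
          · simp [hc, hlt, PySem.Dict.get?_insert_self, ocomb, min_eq_right (le_of_lt hlt)]
          · simp [hc, hlt, ocomb, hg, min_eq_left (by omega : v ≤ b)]
      · by_cases hc : ¬ d0.contains (a, b).1 ∨ (a, b).2 < d0.getD (a, b).1 (a, b).2
        · rw [if_pos hc, PySem.Dict.get?_insert_of_ne d0 _ (Ne.symm h)]
          cases d0.get? k <;> simp [ocomb, h]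
        · rw [if_neg hc]
          cases d0.get? k <;> simp [ocomb, h]
    have hrk : ((ranksOf k ((a, b) :: rest)).min?)
        = ocomb (if a = k then some b else none) ((ranksOf k rest).min?) := by
      by_cases h : a = k
      · subst h
        have : ranksOf a ((a, b) :: rest) = b :: ranksOf a rest := by
          simp [ranksOf]
        rw [this, List.min?_cons]
        cases (ranksOf a rest).min? <;> simp [ocomb, Option.elim]
      · have : ranksOf k ((a, b) :: rest) = ranksOf k rest := by
          simp [ranksOf, h]
        rw [this]
        cases (ranksOf k rest).min? <;> simp [ocomb, h]
    rw [hstep, hrk, ocomb_assoc]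

lemma nodup_keys_foldl_best (l : List (String × Int)) (d0 : PySem.Dict String Int)
    (h : d0.keys.Nodup) : (l.foldl bestStep d0).keys.Nodup := by
  induction l generalizing d0 with
  | nil => exact h
  | cons p rest ih =>
    rw [List.foldl_cons]
    refine ih _ ?_
    unfold bestStep
    split
    · exact PySem.Dict.nodup_keys_insert _ _ _ h
    · exact h

lemma min?_perm (l1 l2 : List Int) (h : l1.Perm l2) : l1.min? = l2.min? := by
  cases e : l1.min? with
  | none =>
    rw [List.min?_eq_none_iff] at e
    subst e
    rw [List.Perm.eq_nil h.symm]
    rfl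
  | some a =>
    rw [List.min?_eq_some_iff] at e
    exact (List.min?_eq_some_iff.mpr ⟨h.mem_iff.mp e.1, fun b hb => e.2 b (h.mem_iff.mpr hb)⟩).symm

-- items of the min-rank dict, rank-first and plainly sorted, = dedup of the A-sorted resolved list
lemma sorted_best_eq_dedup (R : List (String × Int)) :
    PySem.List.sorted (((R.foldl bestStep PySem.Dict.empty).items).map (fun p => (p.2, p.1))) (fun x => toLex x)
      = (dedupF (PySem.List.sorted R keyRI) []).map (fun p => (p.2, p.1)) := by
  set Y := R.foldl bestStep PySem.Dict.empty with hY
  set S := PySem.List.sorted R keyRI with hS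
  have hSperm : S.Perm R := PySem.List.sorted_perm R keyRI false
  have hSpw : S.Pairwise (fun a b => keyRI a ≤ keyRI b) := PySem.List.sorted_pairwise R keyRI
  have hYnodupKeys : Y.keys.Nodup := nodup_keys_foldl_best R PySem.Dict.empty (by simp)
  have hXfst := dedupF_fst_nodup S []
  have hXnodup : (dedupF S []).Nodup := List.Nodup.of_map _ hXfst.1
  have hYitemsNodup : Y.items.Nodup := List.Nodup.of_map (·.1) (by exact hYnodupKeys)
  have hmemY : ∀ (d : String) (r : Int), ((d, r) ∈ Y.items ↔ (ranksOf d R).min? = some r) := by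
    intro d r
    rw [← PySem.Dict.get?_eq_some_iff_mem_items _ _ _ hYnodupKeys, hY, get?_foldl_best]
    simp [PySem.Dict.get?_empty, ocomb]
  have hmemX : ∀ (d : String) (r : Int), ((d, r) ∈ dedupF S [] ↔ (ranksOf d R).min? = some r) := by
    intro d r
    rw [mem_dedupF S [] hSpw]
    have : (ranksOf d S).min? = (ranksOf d R).min? :=
      min?_perm _ _ (List.Perm.map _ (List.Perm.filter _ hSperm))
    simp [this]
  apply PySem.List.sorted_eq_of_perm_of_pairwise_lt
  · refine List.Perm.map _ ?_
    rw [List.perm_ext_iff_of_nodup hXnodup hYitemsNodup]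
    rintro ⟨d, r⟩
    rw [hmemX d r, hmemY d r]
  · have hle : (dedupF S []).Pairwise (fun a b => keyRI a ≤ keyRI b) :=
      List.Pairwise.sublist (dedupF_sublist S []) hSpw
    have hne : (dedupF S []).Pairwise (fun a b => a.1 ≠ b.1) :=
      List.pairwise_map.mp hXfst.1
    rw [List.pairwise_map]
    refine (hle.and hne).imp ?_
    rintro ⟨a1, a2⟩ ⟨b1, b2⟩ ⟨h1, h2⟩
    have : keyRI (a1, a2) < keyRI (b1, b2) := by
      refine lt_of_le_of_ne h1 (fun he => h2 ?_)
      have : ((a2, a1) : Int × String) = (b2, b1) := by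
        simpa [keyRI] using he
      exact (Prod.mk.injEq _ _ _ _ ▸ this).2
    simpa [keyRI] using this

lemma sorted2_eq_sorted_lex (xs : List (String × Int)) :
    PySem.List.sorted2 xs (fun x => x.2) (fun x => x.1) = PySem.List.sorted xs keyRI := by
  have hb : (fun (a b : String × Int) => decide (a.2 < b.2) || (!decide (b.2 < a.2) && decide (a.1 < b.1)))
      = (fun a b => decide (keyRI a < keyRI b)) := by
    funext a b
    rcases lt_trichotomy a.2 b.2 with h | h | h
    · simp [keyRI, Prod.Lex.lt_iff, h]
    · simp [keyRI, Prod.Lex.lt_iff, h]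
    · simp [keyRI, Prod.Lex.lt_iff, h, lt_asymm h, ne_of_gt h]
  simp only [PySem.List.sorted2, PySem.List.sorted, if_neg (by decide : ¬ (false = true))]
  rw [hb]

-- ===== VERDICT (by name: the statement is the Claim_ definition above) =====
theorem top_k_unique_from_run_spec : Claim_equal_top_k_unique_from_run := by
  intro run_map qid top_k line_to_doc_id doc_meta _
  unfold Spec_top_k_unique_from_run
  dsimp only [top_k_unique_from_run, top_k_unique_from_run_alt]
  simp only [resolveAlt_eq]
  have hitems : List.foldl (fun acc p => acc ++ [(resolveDocId p.1 line_to_doc_id doc_meta, p.2)])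
        ([] : List (String × Int)) (((PySem.Dict.mk run_map).get? qid).getD [])
      = (((PySem.Dict.mk run_map).get? qid).getD []).map
          (fun p => (resolveDocId p.1 line_to_doc_id doc_meta, p.2)) := by
    simpa using PySem.List.foldl_append_singleton_eq_map
      (fun p => (resolveDocId p.1 line_to_doc_id doc_meta, p.2)) (((PySem.Dict.mk run_map).get? qid).getD []) []
  have hbest : List.foldl (fun (best : PySem.Dict String Int) p =>
          if ¬ best.contains (resolveDocId p.1 line_to_doc_id doc_meta) ∨
              p.2 < best.getD (resolveDocId p.1 line_to_doc_id doc_meta) p.2 then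
            best.insert (resolveDocId p.1 line_to_doc_id doc_meta) p.2
          else best)
        PySem.Dict.empty (((PySem.Dict.mk run_map).get? qid).getD [])
      = List.foldl bestStep PySem.Dict.empty
          ((((PySem.Dict.mk run_map).get? qid).getD []).map
            (fun p => (resolveDocId p.1 line_to_doc_id doc_meta, p.2))) := by
    rw [List.foldl_map]
    rfl
  rw [hitems, hbest, sorted2_eq_sorted_lex, takeLoopA_eq_takeLoopB, sorted_best_eq_dedup]
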